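-- pv_equiv track=rewrite | github.com/ProjectViVy/agent-diva | scripts/update_provider_models.py | split_provider_blocks
-- ===== SOURCE A (Python) =====
-- def split_provider_blocks(lines: list[str]) -> list[tuple[str, int, int]]:
--     blocks: list[tuple[str, int, int]] = []
--     current_name: str | None = None
--     current_start: int | None = None
--
--     for index, line in enumerate(lines):
--         if line.startswith("- name: "):
--             if current_name is not None and current_start is not None:
--                 blocks.append((current_name, current_start, index))
--             current_name = line[len("- name: ") :].strip()
--             current_start = index
--
--     if current_name is not None and current_start is not None:
--         blocks.append((current_name, current_start, len(lines)))
--     return blocks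
-- ===== SOURCE B (Python) =====
-- def split_provider_blocks(lines: list[str]) -> list[tuple[str, int, int]]:
--     marker = "- name: "
--     markers = [(i, line[len(marker):].strip())
--                for i, line in enumerate(lines) if line.startswith(marker)]
--     ends = [i for i, _ in markers[1:]] + [len(lines)]
--     return [(name, start, end) for (start, name), end in zip(markers, ends)]
-- ===== Notes on version B (the rewrite author's own statement) =====
-- stated objective: simpler
-- what changed: Replaces the running-state flush machine (current_name/current_start with a final flush) by a two-phase table decomposition: collect all marker (index, name) pairs in one comprehension, then zip each marker with the next marker's index (or len(lines)) to form the blocks.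
import Mathlib
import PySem

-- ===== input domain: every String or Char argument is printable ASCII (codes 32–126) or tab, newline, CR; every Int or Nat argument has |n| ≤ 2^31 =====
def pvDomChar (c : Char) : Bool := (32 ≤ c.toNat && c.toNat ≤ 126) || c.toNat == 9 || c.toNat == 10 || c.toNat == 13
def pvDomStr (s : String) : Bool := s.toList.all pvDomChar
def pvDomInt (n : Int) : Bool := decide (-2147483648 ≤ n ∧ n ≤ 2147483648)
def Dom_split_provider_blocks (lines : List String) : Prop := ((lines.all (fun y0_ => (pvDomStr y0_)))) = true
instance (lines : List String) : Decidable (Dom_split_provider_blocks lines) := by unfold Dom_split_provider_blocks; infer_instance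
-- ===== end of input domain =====

-- B replaces A's running-state flush machine with a two-phase decomposition (collect markers, then pair with shifted boundaries); same cost, simpler.

-- ===== PORT A =====
-- A's for-loop over enumerate(lines) with state (blocks, current_name, current_start), plus the final flush.
def splitA_loop (total : Int) : List (Int × String) → List (String × Int × Int) → Option String → Option Int → List (String × Int × Int)
  | [], blocks, cn, cs =>
      match cn, cs with
      | some n, some s => blocks ++ [(n, s, total)]
      | _, _ => blocks
  | (i, line) :: rest, blocks, cn, cs =>
      if PySem.Str.startswith line "- name: " then
        let blocks' := match cn, cs with
          | some n, some s => blocks ++ [(n, s, i)]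
          | _, _ => blocks
        splitA_loop total rest blocks' (some (PySem.Str.strip (PySem.Str.slice line (some 8) none))) (some i)
      else
        splitA_loop total rest blocks cn cs

def split_provider_blocks (lines : List String) : List (String × Int × Int) :=
  splitA_loop (lines.length : Int) (PySem.List.enumerate lines 0) [] none none

-- ===== PORT B =====
def split_provider_blocks_alt (lines : List String) : List (String × Int × Int) :=
  let marker := "- name: "
  let markers := (PySem.List.enumerate lines 0).filterMap
      (fun p => if PySem.Str.startswith p.2 marker then
                  some (p.1, PySem.Str.strip (PySem.Str.slice p.2 (some (PySem.Str.len marker)) none))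
                else none)
  let ends := markers.tail.map (·.1) ++ [(lines.length : Int)]
  (markers.zip ends).map (fun q => (q.1.2, q.1.1, q.2))

-- ===== PRECONDITION & SPEC =====
def Spec_split_provider_blocks (lines : List String) (out : List (String × Int × Int)) : Prop := out = split_provider_blocks_alt lines
instance (lines : List String) (out : List (String × Int × Int)) : Decidable (Spec_split_provider_blocks lines out) := by unfold Spec_split_provider_blocks; infer_instance

-- ===== CLAIM (what is proved, stated in full; the proofs are below) =====
def Claim_equal_split_provider_blocks : Prop := ∀ (lines : List String), Dom_split_provider_blocks lines → Spec_split_provider_blocks lines (split_provider_blocks lines)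

-- ===== LEMMAS AND PROOFS =====

def markersOf (pairs : List (Int × String)) : List (Int × String) :=
  pairs.filterMap
    (fun p => if PySem.Str.startswith p.2 "- name: " then
                some (p.1, PySem.Str.strip (PySem.Str.slice p.2 (some (PySem.Str.len "- name: ")) none))
              else none)

def mkBlocks (ms : List (Int × String)) (total : Int) : List (String × Int × Int) :=
  (ms.zip (ms.tail.map (·.1) ++ [total])).map (fun q => (q.1.2, q.1.1, q.2))

lemma len_marker : (PySem.Str.len "- name: ") = 8 := by decide

lemma markersOf_cons_pos (i : Int) (l : String) (rest : List (Int × String))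
    (h : PySem.Str.startswith l "- name: " = true) :
    markersOf ((i, l) :: rest) = (i, PySem.Str.strip (PySem.Str.slice l (some 8) none)) :: markersOf rest := by
  simp only [markersOf, List.filterMap_cons, h, len_marker, ite_true]

lemma markersOf_cons_neg (i : Int) (l : String) (rest : List (Int × String))
    (h : ¬ PySem.Str.startswith l "- name: " = true) :
    markersOf ((i, l) :: rest) = markersOf rest := by
  simp only [markersOf, List.filterMap_cons, Bool.not_eq_true] at *
  simp only [h]
  simp

lemma mkBlocks_cons_cons (s i t : Int) (n m : String) (ms : List (Int × String)) :
    mkBlocks ((s, n) :: (i, m) :: ms) t = (n, s, i) :: mkBlocks ((i, m) :: ms) t := by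
  simp [mkBlocks]

lemma loop_some (t : Int) (pairs : List (Int × String)) :
    ∀ (blocks : List (String × Int × Int)) (n : String) (s : Int),
      splitA_loop t pairs blocks (some n) (some s) = blocks ++ mkBlocks ((s, n) :: markersOf pairs) t := by
  induction pairs with
  | nil => intro blocks n s; simp [splitA_loop, markersOf, mkBlocks]
  | cons p rest ih =>
      intro blocks n s
      obtain ⟨i, l⟩ := p
      by_cases h : PySem.Str.startswith l "- name: " = true
      · rw [markersOf_cons_pos i l rest h]
        simp only [splitA_loop, h, if_pos]
        rw [ih, mkBlocks_cons_cons, List.append_assoc]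
        rfl
      · rw [markersOf_cons_neg i l rest h]
        simp only [splitA_loop, h]
        exact ih blocks n s

lemma loop_none (t : Int) (pairs : List (Int × String)) :
    ∀ (blocks : List (String × Int × Int)),
      splitA_loop t pairs blocks none none = blocks ++ mkBlocks (markersOf pairs) t := by
  induction pairs with
  | nil => intro blocks; simp [splitA_loop, markersOf, mkBlocks]
  | cons p rest ih =>
      intro blocks
      obtain ⟨i, l⟩ := p
      by_cases h : PySem.Str.startswith l "- name: " = true
      · rw [markersOf_cons_pos i l rest h]
        simp only [splitA_loop, h, if_pos]
        exact loop_some t rest blocks _ i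
      · rw [markersOf_cons_neg i l rest h]
        simp only [splitA_loop, h]
        exact ih blocks

-- ===== VERDICT (by name: the statement is the Claim_ definition above) =====
theorem split_provider_blocks_spec : Claim_equal_split_provider_blocks := by
  intro lines _
  show split_provider_blocks lines = split_provider_blocks_alt lines
  unfold split_provider_blocks split_provider_blocks_alt
  rw [loop_none]
  simp [markersOf, mkBlocks]
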